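-- pv_equiv track=rewrite | github.com/DEcloi/daily_programming | daily_programming/200406_60.py | solution
-- ===== SOURCE A (Python) =====
-- def solution(input_list):
--     n = len(input_list)
--     n_sum = 0
--     list_sum = 0
--     for index in range(len(input_list)):
--         list_sum += input_list[index]
--         n_sum += (index + 1)
--
--     return list_sum - (n_sum - n)
-- ===== SOURCE B (Python) =====
-- def solution(input_list):
--     n = len(input_list)
--     return sum(input_list) - n * (n - 1) // 2
-- ===== Notes on version B (the rewrite author's own statement) =====
-- stated objective: simpler
-- what changed: Replaced the explicit index loop accumulating both list_sum and the triangular sum n_sum with builtin sum plus the closed form n*(n-1)//2 in a single return expression.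
import Mathlib
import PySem

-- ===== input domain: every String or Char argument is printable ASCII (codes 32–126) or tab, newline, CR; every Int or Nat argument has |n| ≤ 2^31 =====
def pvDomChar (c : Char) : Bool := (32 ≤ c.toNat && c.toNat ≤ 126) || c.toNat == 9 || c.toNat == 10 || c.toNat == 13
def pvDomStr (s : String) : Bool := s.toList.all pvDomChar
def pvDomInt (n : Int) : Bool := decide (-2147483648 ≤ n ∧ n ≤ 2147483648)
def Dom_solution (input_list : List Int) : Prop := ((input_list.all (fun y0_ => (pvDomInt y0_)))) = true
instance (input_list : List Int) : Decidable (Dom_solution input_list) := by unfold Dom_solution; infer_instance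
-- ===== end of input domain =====

-- B replaces A's index loop (accumulating list_sum and the triangular n_sum) by builtin sum
-- plus the closed form n*(n-1)//2; same O(n) cost, simpler.

-- ===== PORT A =====
def solution (input_list : List Int) : Int :=
  let n : Int := PySem.List.len input_list
  let st := (PySem.List.pyRange 0 (PySem.List.len input_list) 1).foldl
    (fun (st : Int × Int) index =>
      (st.1 + PySem.List.pyGetD input_list index 0, st.2 + (index + 1))) (0, 0)
  st.1 - (st.2 - n)

-- ===== PORT B =====
def solution_alt (input_list : List Int) : Int :=
  let n : Int := PySem.List.len input_list
  input_list.sum - PySem.Int.floordiv (n * (n - 1)) 2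

-- ===== PRECONDITION & SPEC =====
def Spec_solution (input_list : List Int) (out : Int) : Prop := out = solution_alt input_list
instance (input_list : List Int) (out : Int) : Decidable (Spec_solution input_list out) := by unfold Spec_solution; infer_instance

-- ===== CLAIM (what is proved, stated in full; the proofs are below) =====
def Claim_equal_solution : Prop := ∀ (input_list : List Int), Dom_solution input_list → Spec_solution input_list (solution input_list)

-- ===== LEMMAS AND PROOFS =====

-- the first fold component is the list sum
lemma loop_fst (xs : List Int) :
    (PySem.List.pyRange 0 (PySem.List.len xs) 1).foldl
      (fun acc j => acc + PySem.List.pyGetD xs j 0) 0 = xs.sum := by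
  rw [PySem.List.foldl_pyRange_zero_pyGetD xs 0 (· + ·) 0, List.sum_eq_foldl]

-- gauss: the triangular accumulator starting from an arbitrary accumulator
lemma loop_snd (n : Nat) (a : Int) :
    (PySem.List.pyRange 0 (n : Int) 1).foldl (fun acc j => acc + (j + 1)) a
      = a + (n * (n + 1)) / 2 := by
  induction n generalizing a with
  | zero => simp [PySem.List.pyRange_one_eq_nil]
  | succ m ih =>
    have h : ((m + 1 : Nat) : Int) = (m : Int) + 1 := by push_cast; ring
    rw [h, PySem.List.pyRange_one_succ_right (by positivity), List.foldl_append, ih]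
    simp only [List.foldl_cons, List.foldl_nil]
    obtain ⟨k, hk⟩ := Int.even_mul_succ_self (m : Int)
    have e1 : (m : Int) * ((m : Int) + 1) = 2 * k := by omega
    have e2 : ((m : Int) + 1) * (((m : Int) + 1) + 1) = 2 * (k + (m : Int) + 1) := by
      linear_combination e1
    rw [e1, e2, Int.mul_ediv_cancel_left _ two_ne_zero, Int.mul_ediv_cancel_left _ two_ne_zero]
    ring

lemma floordiv_two_mul (k : Int) : PySem.Int.floordiv (2 * k) 2 = k := by
  simp [PySem.Int.floordiv]

theorem solution_spec : Claim_equal_solution := by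
  intro xs _
  unfold Spec_solution solution solution_alt
  simp only [PySem.List.foldl_prod_mk (fun acc j => acc + PySem.List.pyGetD xs j 0) (fun acc j => acc + (j + 1))]
  rw [loop_fst xs]
  have hlen : PySem.List.len xs = ((xs.length : Nat) : Int) := by simp [PySem.List.len_eq]
  rw [hlen, loop_snd xs.length 0]
  set n : Int := (xs.length : Int) with hn
  obtain ⟨k, hk⟩ := Int.even_mul_succ_self n
  have e1 : n * (n + 1) = 2 * k := by omega
  have e2 : n * (n - 1) = 2 * (k - n) := by linear_combination e1
  rw [e1, e2, Int.mul_ediv_cancel_left _ two_ne_zero, floordiv_two_mul]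
  ring
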